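-- pv_equiv track=rewrite | github.com/KhaledBadran/FairBoost | scripts/results/rectangular_plot.py | rename_configs
-- ===== SOURCE A (Python) =====
-- def rename_configs(t):
--     """
--     Renames the configurations .
--             Parameters:
--                     t : list of the data to rename
--     """
--     t = ["Ensembling baseline" if any(j in i for j in [
--         "Fairboost : compas-baseline-Random Forest-NONE",
--         "Fairboost : compas-baseline-Logistic Regression-NONE",
--         "Fairboost : german-baseline-Random Forest-NONE",
--         "Fairboost : german-baseline-Logistic Regression-NONE",
--         "Fairboost : adult-baseline-Random Forest-NONE",
--         "Fairboost : adult-baseline-Logistic Regression-NONE"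
--     ])
--          else i for i in
--          t]
--     t = ["Fairboost: NONE/LFR,RW,OP" if any(j in i for j in [
--         "Fairboost : compas-fairboost-Random Forest-NONE",
--         "Fairboost : compas-fairboost-Logistic Regression-NONE"
--         "Fairboost : german-fairboost-Random Forest-NONE",
--         "Fairboost : german-fairboost-Logistic Regression-NONE",
--         "Fairboost : adult-fairboost-Random Forest-NONE",
--         "Fairboost : adult-fairboost-Logistic Regression-NONE"
--     ]) else i for i in
--          t]
--
--     t = ["Fairboost: Default/LFR,RW,OP" if any(j in i for j in [
--         "Fairboost : compas-fairboost-Random Forest-DEFAULT",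
--         "Fairboost : compas-fairboost-Logistic Regression-DEFAULT",
--         "Fairboost : german-fairboost-Random Forest-DEFAULT",
--         "Fairboost : german-fairboost-Logistic Regression-DEFAULT",
--         "Fairboost : adult-fairboost-Random Forest-DEFAULT",
--         "Fairboost : adult-fairboost-Logistic Regression-DEFAULT"
--     ]) else i for i in
--          t]
--
--     t = ["Fairboost: CUSTOM/LFR,RW,OP" if any(j in i for j in [
--         "Fairboost : compas-fairboost-Random Forest-CUSTOM",
--         "Fairboost : compas-fairboost-Logistic Regression-CUSTOM",
--         "Fairboost : german-fairboost-Random Forest-CUSTOM",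
--         "Fairboost : german-fairboost-Logistic Regression-CUSTOM",
--         "Fairboost : adult-fairboost-Random Forest-CUSTOM",
--         "Fairboost : adult-fairboost-Logistic Regression-CUSTOM"
--     ]) else i for i in
--          t]
--
--     t = ["Baseline" if any(j in i for j in ["baseline-Logistic Regression", "baseline-Random Forest"]) else i for i in
--          t]
--     t = ["Optimized Preprocessing \n(OP)" if any(
--         j in i for j in ["OptimPreproc-Logistic Regression", "OptimPreproc-Random Forest"]) else i for i in t]
--     t = ["Learning Fair Representation \n (LFR)" if any(
--         j in i for j in ["LFR-Logistic Regression", "LFR-Random Forest"]) else i for i in t]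
--     t = ["Reweighing \n(RW)" if any(
--         j in i for j in ["Reweighing-Logistic Regression", "Reweighing-Random Forest"]) else i
--          for i in t]
--     return t
-- ===== SOURCE B (Python) =====
-- # One ordered rule table + a single first-match pass, instead of eight sequential
-- # list rebuilds.  The table lists all six "fairboost-*-NONE" patterns separately,
-- # fixing the missing comma in A's second pattern list (which accidentally glued
-- # two patterns into one never-matching string).
--
-- _RULES = [
--     ("Ensembling baseline", [
--         "Fairboost : compas-baseline-Random Forest-NONE",
--         "Fairboost : compas-baseline-Logistic Regression-NONE",
--         "Fairboost : german-baseline-Random Forest-NONE",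
--         "Fairboost : german-baseline-Logistic Regression-NONE",
--         "Fairboost : adult-baseline-Random Forest-NONE",
--         "Fairboost : adult-baseline-Logistic Regression-NONE",
--     ]),
--     ("Fairboost: NONE/LFR,RW,OP", [
--         "Fairboost : compas-fairboost-Random Forest-NONE",
--         "Fairboost : compas-fairboost-Logistic Regression-NONE",
--         "Fairboost : german-fairboost-Random Forest-NONE",
--         "Fairboost : german-fairboost-Logistic Regression-NONE",
--         "Fairboost : adult-fairboost-Random Forest-NONE",
--         "Fairboost : adult-fairboost-Logistic Regression-NONE",
--     ]),
--     ("Fairboost: Default/LFR,RW,OP", [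
--         "Fairboost : compas-fairboost-Random Forest-DEFAULT",
--         "Fairboost : compas-fairboost-Logistic Regression-DEFAULT",
--         "Fairboost : german-fairboost-Random Forest-DEFAULT",
--         "Fairboost : german-fairboost-Logistic Regression-DEFAULT",
--         "Fairboost : adult-fairboost-Random Forest-DEFAULT",
--         "Fairboost : adult-fairboost-Logistic Regression-DEFAULT",
--     ]),
--     ("Fairboost: CUSTOM/LFR,RW,OP", [
--         "Fairboost : compas-fairboost-Random Forest-CUSTOM",
--         "Fairboost : compas-fairboost-Logistic Regression-CUSTOM",
--         "Fairboost : german-fairboost-Random Forest-CUSTOM",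
--         "Fairboost : german-fairboost-Logistic Regression-CUSTOM",
--         "Fairboost : adult-fairboost-Random Forest-CUSTOM",
--         "Fairboost : adult-fairboost-Logistic Regression-CUSTOM",
--     ]),
--     ("Baseline", ["baseline-Logistic Regression", "baseline-Random Forest"]),
--     ("Optimized Preprocessing \n(OP)",
--      ["OptimPreproc-Logistic Regression", "OptimPreproc-Random Forest"]),
--     ("Learning Fair Representation \n (LFR)",
--      ["LFR-Logistic Regression", "LFR-Random Forest"]),
--     ("Reweighing \n(RW)",
--      ["Reweighing-Logistic Regression", "Reweighing-Random Forest"]),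
-- ]
--
--
-- def rename_configs(t):
--     out = []
--     for i in t:
--         for label, pats in _RULES:
--             if any(p in i for p in pats):
--                 out.append(label)
--                 break
--         else:
--             out.append(i)
--     return out
-- ===== Notes on version B (the rewrite author's own statement) =====
-- stated objective: simpler
-- what changed: Replaces A's eight sequential whole-list rebuilds with one ordered (label, patterns) rule table and a single pass that relabels each element by the first matching rule, and fixes the missing comma in A's second pattern list that glued two patterns into one never-matching string.
-- intended difference: On lists with an element containing 'Fairboost : compas-fairboost-Logistic Regression-NONE' or 'Fairboost : german-fairboost-Random Forest-NONE' but no pattern of A's first or (comma-bugged) second pattern list, A leaves that element unrenamed (its second list lost those two patterns to a missing comma, concatenating them into one string) while B relabels it 'Fairboost: NONE/LFR,RW,OP' as the list obviously intended. — e.g. on rename_configs(["Fairboost : compas-fairboost-Logistic Regression-NONE"]): A returns ["Fairboost : compas-fairboost-Logistic Regression-NONE"], B returns ["Fairboost: NONE/LFR,RW,OP"]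
import Mathlib
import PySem

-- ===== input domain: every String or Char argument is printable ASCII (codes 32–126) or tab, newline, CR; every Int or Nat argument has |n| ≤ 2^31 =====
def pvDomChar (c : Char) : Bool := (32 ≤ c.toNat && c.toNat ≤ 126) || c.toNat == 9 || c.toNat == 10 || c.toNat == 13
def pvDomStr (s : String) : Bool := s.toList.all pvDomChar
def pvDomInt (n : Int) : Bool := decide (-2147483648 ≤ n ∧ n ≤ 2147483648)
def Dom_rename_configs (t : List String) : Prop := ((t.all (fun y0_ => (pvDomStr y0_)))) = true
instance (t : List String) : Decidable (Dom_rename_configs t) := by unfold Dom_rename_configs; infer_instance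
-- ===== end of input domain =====

-- B replaces A's eight sequential list rebuilds by one first-match pass over an
-- ordered rule table, and fixes the missing comma in A's second pattern list
-- (see D_rename_configs below for the stated intended difference).

-- ===== PORT A =====
-- `any(j in i for j in pats)` of one pass:
def pvMatch (pats : List String) (i : String) : Bool := pats.any (fun j => PySem.Str.isIn j i)
-- one list-comprehension pass `[lbl if any(...) else i for i in t]` maps this over t:
def pvPass (pats : List String) (lbl : String) (i : String) : String :=
  if pvMatch pats i then lbl else i
-- A's pattern lists and labels, in pass order.  pvPatsA2 has FIVE entries: A's
-- source is missing a comma, so two patterns are concatenated into the second entry.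
def pvPats1 : List String :=
  ["Fairboost : compas-baseline-Random Forest-NONE",
   "Fairboost : compas-baseline-Logistic Regression-NONE",
   "Fairboost : german-baseline-Random Forest-NONE",
   "Fairboost : german-baseline-Logistic Regression-NONE",
   "Fairboost : adult-baseline-Random Forest-NONE",
   "Fairboost : adult-baseline-Logistic Regression-NONE"]
def pvPatsA2 : List String :=
  ["Fairboost : compas-fairboost-Random Forest-NONE",
   "Fairboost : compas-fairboost-Logistic Regression-NONEFairboost : german-fairboost-Random Forest-NONE",
   "Fairboost : german-fairboost-Logistic Regression-NONE",
   "Fairboost : adult-fairboost-Random Forest-NONE",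
   "Fairboost : adult-fairboost-Logistic Regression-NONE"]
def pvPats3 : List String :=
  ["Fairboost : compas-fairboost-Random Forest-DEFAULT",
   "Fairboost : compas-fairboost-Logistic Regression-DEFAULT",
   "Fairboost : german-fairboost-Random Forest-DEFAULT",
   "Fairboost : german-fairboost-Logistic Regression-DEFAULT",
   "Fairboost : adult-fairboost-Random Forest-DEFAULT",
   "Fairboost : adult-fairboost-Logistic Regression-DEFAULT"]
def pvPats4 : List String :=
  ["Fairboost : compas-fairboost-Random Forest-CUSTOM",
   "Fairboost : compas-fairboost-Logistic Regression-CUSTOM",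
   "Fairboost : german-fairboost-Random Forest-CUSTOM",
   "Fairboost : german-fairboost-Logistic Regression-CUSTOM",
   "Fairboost : adult-fairboost-Random Forest-CUSTOM",
   "Fairboost : adult-fairboost-Logistic Regression-CUSTOM"]
def pvPats5 : List String := ["baseline-Logistic Regression", "baseline-Random Forest"]
def pvPats6 : List String := ["OptimPreproc-Logistic Regression", "OptimPreproc-Random Forest"]
def pvPats7 : List String := ["LFR-Logistic Regression", "LFR-Random Forest"]
def pvPats8 : List String := ["Reweighing-Logistic Regression", "Reweighing-Random Forest"]
def pvLbl1 : String := "Ensembling baseline"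
def pvLbl2 : String := "Fairboost: NONE/LFR,RW,OP"
def pvLbl3 : String := "Fairboost: Default/LFR,RW,OP"
def pvLbl4 : String := "Fairboost: CUSTOM/LFR,RW,OP"
def pvLbl5 : String := "Baseline"
def pvLbl6 : String := "Optimized Preprocessing \n(OP)"
def pvLbl7 : String := "Learning Fair Representation \n (LFR)"
def pvLbl8 : String := "Reweighing \n(RW)"

def rename_configs (t : List String) : List String :=
  let t := t.map (pvPass pvPats1 pvLbl1)
  let t := t.map (pvPass pvPatsA2 pvLbl2)
  let t := t.map (pvPass pvPats3 pvLbl3)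
  let t := t.map (pvPass pvPats4 pvLbl4)
  let t := t.map (pvPass pvPats5 pvLbl5)
  let t := t.map (pvPass pvPats6 pvLbl6)
  let t := t.map (pvPass pvPats7 pvLbl7)
  let t := t.map (pvPass pvPats8 pvLbl8)
  t

-- ===== PORT B =====
-- B's rule 2 has the SIX separate patterns (the comma fixed):
def pvPatsB2 : List String :=
  ["Fairboost : compas-fairboost-Random Forest-NONE",
   "Fairboost : compas-fairboost-Logistic Regression-NONE",
   "Fairboost : german-fairboost-Random Forest-NONE",
   "Fairboost : german-fairboost-Logistic Regression-NONE",
   "Fairboost : adult-fairboost-Random Forest-NONE",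
   "Fairboost : adult-fairboost-Logistic Regression-NONE"]
-- Source B's _RULES table:
def pvRules : List (String × List String) :=
  [(pvLbl1, pvPats1), (pvLbl2, pvPatsB2), (pvLbl3, pvPats3), (pvLbl4, pvPats4),
   (pvLbl5, pvPats5), (pvLbl6, pvPats6), (pvLbl7, pvPats7), (pvLbl8, pvPats8)]
-- the inner for/else loop: label of the first matching rule, else the element itself:
def pvScan : List (String × List String) → String → String
  | [], i => i
  | (lbl, pats) :: rs, i => if pvMatch pats i then lbl else pvScan rs i

def rename_configs_alt (t : List String) : List String := t.map (pvScan pvRules)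

-- ===== PRECONDITION & SPEC =====
-- On lists with an element containing "Fairboost : compas-fairboost-Logistic Regression-NONE"
-- or "Fairboost : german-fairboost-Random Forest-NONE" but no pattern of A's first or
-- (comma-bugged) second list, A leaves that element unrenamed (a missing comma glued those
-- two patterns into one never-matching string) while B relabels it "Fairboost: NONE/LFR,RW,OP"
-- as intended.
def pvDiffStr (i : String) : Bool :=
  (PySem.Str.isIn "Fairboost : compas-fairboost-Logistic Regression-NONE" i
    || PySem.Str.isIn "Fairboost : german-fairboost-Random Forest-NONE" i)
  && !(pvMatch pvPats1 i) && !(pvMatch pvPatsA2 i)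
def D_rename_configs (t : List String) : Prop := t.any pvDiffStr = true
instance (t : List String) : Decidable (D_rename_configs t) := by unfold D_rename_configs; infer_instance
def Spec_rename_configs (t : List String) (out : List String) : Prop :=
  ¬ D_rename_configs t → out = rename_configs_alt t
instance (t : List String) (out : List String) : Decidable (Spec_rename_configs t out) := by unfold Spec_rename_configs; infer_instance
def pvDiffWitness_rename_configs : List String :=
  ["Fairboost : compas-fairboost-Logistic Regression-NONE"]
def pvDiffWitnessOut_rename_configs : (List String) × (List String) :=
  (["Fairboost : compas-fairboost-Logistic Regression-NONE"], ["Fairboost: NONE/LFR,RW,OP"])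

-- ===== CLAIM (what is proved, stated in full; the proofs are below) =====
def Claim_unchanged_rename_configs : Prop :=
  ∀ (t : List String), Dom_rename_configs t → Spec_rename_configs t (rename_configs t)
def Claim_changed_rename_configs : Prop :=
  Dom_rename_configs (pvDiffWitness_rename_configs) ∧ D_rename_configs (pvDiffWitness_rename_configs) ∧ rename_configs (pvDiffWitness_rename_configs) = pvDiffWitnessOut_rename_configs.1 ∧ rename_configs_alt (pvDiffWitness_rename_configs) = pvDiffWitnessOut_rename_configs.2 ∧ pvDiffWitnessOut_rename_configs.1 ≠ pvDiffWitnessOut_rename_configs.2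
def Claim_exact_rename_configs : Prop :=
  ∀ (t : List String), Dom_rename_configs t → D_rename_configs t → rename_configs t ≠ rename_configs_alt t

-- ===== LEMMAS AND PROOFS =====

set_option maxRecDepth 10000 in
set_option maxHeartbeats 2000000 in
theorem pv_isIn_concat (i : String)
    (hc : PySem.Str.isIn "Fairboost : compas-fairboost-Logistic Regression-NONEFairboost : german-fairboost-Random Forest-NONE" i = true) :
    PySem.Str.isIn "Fairboost : compas-fairboost-Logistic Regression-NONE" i = true := by
  rw [PySem.Str.isIn_iff_infix] at hc ⊢
  exact List.IsInfix.trans (by decide) hc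

set_option maxRecDepth 10000 in
set_option maxHeartbeats 4000000 in
theorem pv_elem_eq (i : String) (h : pvDiffStr i = false) :
    pvPass pvPats8 pvLbl8 (pvPass pvPats7 pvLbl7 (pvPass pvPats6 pvLbl6 (pvPass pvPats5 pvLbl5
      (pvPass pvPats4 pvLbl4 (pvPass pvPats3 pvLbl3 (pvPass pvPatsA2 pvLbl2 (pvPass pvPats1 pvLbl1 i)))))))
    = pvScan pvRules i := by
  by_cases h1 : pvMatch pvPats1 i = true
  · rw [show pvPass pvPats1 pvLbl1 i = pvLbl1 from by simp [pvPass, h1]]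
    rw [show pvScan pvRules i = pvLbl1 from by simp [pvScan, pvRules, h1]]
    decide
  · simp only [Bool.not_eq_true] at h1
    rw [show pvPass pvPats1 pvLbl1 i = i from by simp [pvPass, h1]]
    by_cases h2a : pvMatch pvPatsA2 i = true
    · have hB2 : pvMatch pvPatsB2 i = true := by
        obtain ⟨j, hj, hij⟩ := List.any_eq_true.mp h2a
        simp only [pvPatsA2, List.mem_cons, List.not_mem_nil, or_false] at hj
        rcases hj with rfl | rfl | rfl | rfl | rfl
        · exact List.any_eq_true.mpr ⟨_, by simp [pvPatsB2], hij⟩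
        · exact List.any_eq_true.mpr ⟨_, by simp [pvPatsB2], pv_isIn_concat i hij⟩
        all_goals exact List.any_eq_true.mpr ⟨_, by simp [pvPatsB2], hij⟩
      rw [show pvPass pvPatsA2 pvLbl2 i = pvLbl2 from by simp [pvPass, h2a]]
      rw [show pvScan pvRules i = pvLbl2 from by simp [pvScan, pvRules, h1, hB2]]
      decide
    · simp only [Bool.not_eq_true] at h2a
      have hB2 : pvMatch pvPatsB2 i = false := by
        by_contra hb
        simp only [Bool.not_eq_false] at hb
        obtain ⟨j, hj, hij⟩ := List.any_eq_true.mp hb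
        have hA2 := List.any_eq_false.mp h2a
        simp only [pvPatsB2, List.mem_cons, List.not_mem_nil, or_false] at hj
        have hd : pvDiffStr i = true := by
          rcases hj with rfl | rfl | rfl | rfl | rfl | rfl
          · exact absurd hij (hA2 _ (by simp [pvPatsA2]))
          · simp only [pvDiffStr, hij, h1, h2a, Bool.true_or, Bool.not_false, Bool.and_true]
          · simp only [pvDiffStr, hij, h1, h2a, Bool.or_true, Bool.not_false, Bool.and_true]
          all_goals exact absurd hij (hA2 _ (by simp [pvPatsA2]))
        rw [hd] at h; simp at h
      rw [show pvPass pvPatsA2 pvLbl2 i = i from by simp [pvPass, h2a]]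
      by_cases h3 : pvMatch pvPats3 i = true
      · rw [show pvPass pvPats3 pvLbl3 i = pvLbl3 from by simp [pvPass, h3]]
        rw [show pvScan pvRules i = pvLbl3 from by
          simp [pvScan, pvRules, h1, hB2, h3]]
        decide
      · simp only [Bool.not_eq_true] at h3
        rw [show pvPass pvPats3 pvLbl3 i = i from by simp [pvPass, h3]]
        by_cases h4 : pvMatch pvPats4 i = true
        · rw [show pvPass pvPats4 pvLbl4 i = pvLbl4 from by simp [pvPass, h4]]
          rw [show pvScan pvRules i = pvLbl4 from by
            simp [pvScan, pvRules, h1, hB2, h3, h4]]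
          decide
        · simp only [Bool.not_eq_true] at h4
          rw [show pvPass pvPats4 pvLbl4 i = i from by simp [pvPass, h4]]
          by_cases h5 : pvMatch pvPats5 i = true
          · rw [show pvPass pvPats5 pvLbl5 i = pvLbl5 from by simp [pvPass, h5]]
            rw [show pvScan pvRules i = pvLbl5 from by
              simp [pvScan, pvRules, h1, hB2, h3, h4, h5]]
            decide
          · simp only [Bool.not_eq_true] at h5
            rw [show pvPass pvPats5 pvLbl5 i = i from by simp [pvPass, h5]]
            by_cases h6 : pvMatch pvPats6 i = true
            · rw [show pvPass pvPats6 pvLbl6 i = pvLbl6 from by simp [pvPass, h6]]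
              rw [show pvScan pvRules i = pvLbl6 from by
                simp [pvScan, pvRules, h1, hB2, h3, h4, h5, h6]]
              decide
            · simp only [Bool.not_eq_true] at h6
              rw [show pvPass pvPats6 pvLbl6 i = i from by simp [pvPass, h6]]
              by_cases h7 : pvMatch pvPats7 i = true
              · rw [show pvPass pvPats7 pvLbl7 i = pvLbl7 from by simp [pvPass, h7]]
                rw [show pvScan pvRules i = pvLbl7 from by
                  simp [pvScan, pvRules, h1, hB2, h3, h4, h5, h6, h7]]
                decide
              · simp only [Bool.not_eq_true] at h7
                rw [show pvPass pvPats7 pvLbl7 i = i from by simp [pvPass, h7]]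
                by_cases h8 : pvMatch pvPats8 i = true
                · rw [show pvPass pvPats8 pvLbl8 i = pvLbl8 from by simp [pvPass, h8]]
                  rw [show pvScan pvRules i = pvLbl8 from by
                    simp [pvScan, pvRules, h1, hB2, h3, h4, h5, h6, h7, h8]]
                · simp only [Bool.not_eq_true] at h8
                  rw [show pvPass pvPats8 pvLbl8 i = i from by simp [pvPass, h8]]
                  rw [show pvScan pvRules i = i from by
                    simp [pvScan, pvRules, h1, hB2, h3, h4, h5, h6, h7, h8]]

set_option maxRecDepth 10000 in
set_option maxHeartbeats 4000000 in
theorem pv_elem_ne (i : String) (h : pvDiffStr i = true) :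
    pvPass pvPats8 pvLbl8 (pvPass pvPats7 pvLbl7 (pvPass pvPats6 pvLbl6 (pvPass pvPats5 pvLbl5
      (pvPass pvPats4 pvLbl4 (pvPass pvPats3 pvLbl3 (pvPass pvPatsA2 pvLbl2 (pvPass pvPats1 pvLbl1 i)))))))
    ≠ pvScan pvRules i := by
  simp only [pvDiffStr, Bool.and_eq_true, Bool.or_eq_true, Bool.not_eq_true'] at h
  obtain ⟨⟨hlost, h1⟩, h2a⟩ := h
  have hB2 : pvMatch pvPatsB2 i = true := by
    rcases hlost with hl | hl
    · exact List.any_eq_true.mpr ⟨_, by simp [pvPatsB2], hl⟩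
    · exact List.any_eq_true.mpr ⟨_, by simp [pvPatsB2], hl⟩
  rw [show pvScan pvRules i = pvLbl2 from by simp [pvScan, pvRules, h1, hB2]]
  rw [show pvPass pvPats1 pvLbl1 i = i from by simp [pvPass, h1]]
  rw [show pvPass pvPatsA2 pvLbl2 i = i from by simp [pvPass, h2a]]
  by_cases h3 : pvMatch pvPats3 i = true
  · rw [show pvPass pvPats3 pvLbl3 i = pvLbl3 from by simp [pvPass, h3]]
    decide
  · simp only [Bool.not_eq_true] at h3
    rw [show pvPass pvPats3 pvLbl3 i = i from by simp [pvPass, h3]]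
    by_cases h4 : pvMatch pvPats4 i = true
    · rw [show pvPass pvPats4 pvLbl4 i = pvLbl4 from by simp [pvPass, h4]]
      decide
    · simp only [Bool.not_eq_true] at h4
      rw [show pvPass pvPats4 pvLbl4 i = i from by simp [pvPass, h4]]
      by_cases h5 : pvMatch pvPats5 i = true
      · rw [show pvPass pvPats5 pvLbl5 i = pvLbl5 from by simp [pvPass, h5]]
        decide
      · simp only [Bool.not_eq_true] at h5
        rw [show pvPass pvPats5 pvLbl5 i = i from by simp [pvPass, h5]]
        by_cases h6 : pvMatch pvPats6 i = true
        · rw [show pvPass pvPats6 pvLbl6 i = pvLbl6 from by simp [pvPass, h6]]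
          decide
        · simp only [Bool.not_eq_true] at h6
          rw [show pvPass pvPats6 pvLbl6 i = i from by simp [pvPass, h6]]
          by_cases h7 : pvMatch pvPats7 i = true
          · rw [show pvPass pvPats7 pvLbl7 i = pvLbl7 from by simp [pvPass, h7]]
            decide
          · simp only [Bool.not_eq_true] at h7
            rw [show pvPass pvPats7 pvLbl7 i = i from by simp [pvPass, h7]]
            by_cases h8 : pvMatch pvPats8 i = true
            · rw [show pvPass pvPats8 pvLbl8 i = pvLbl8 from by simp [pvPass, h8]]
              decide
            · simp only [Bool.not_eq_true] at h8
              rw [show pvPass pvPats8 pvLbl8 i = i from by simp [pvPass, h8]]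
              intro heq
              rcases hlost with hl | hl
              · rw [heq] at hl; exact absurd hl (by decide)
              · rw [heq] at hl; exact absurd hl (by decide)

theorem pv_portA_map (t : List String) :
    rename_configs t = t.map (fun i =>
      pvPass pvPats8 pvLbl8 (pvPass pvPats7 pvLbl7 (pvPass pvPats6 pvLbl6 (pvPass pvPats5 pvLbl5
        (pvPass pvPats4 pvLbl4 (pvPass pvPats3 pvLbl3 (pvPass pvPatsA2 pvLbl2 (pvPass pvPats1 pvLbl1 i)))))))) := by
  simp [rename_configs, List.map_map, Function.comp]

-- ===== VERDICT (by name: the statement is the Claim_ definition above) =====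
theorem rename_configs_spec : Claim_unchanged_rename_configs := by
  intro t _ hD
  rw [pv_portA_map, rename_configs_alt]
  refine List.map_congr_left ?_
  intro i hi
  refine pv_elem_eq i ?_
  by_contra hne
  exact hD (List.any_eq_true.mpr ⟨i, hi, by simpa using hne⟩)

set_option maxRecDepth 10000 in
theorem rename_configs_changed : Claim_changed_rename_configs := by
  unfold Claim_changed_rename_configs; decide

theorem rename_configs_tight : Claim_exact_rename_configs := by
  intro t _ hD heq
  obtain ⟨i, hi, hdi⟩ := List.any_eq_true.mp hD
  rw [pv_portA_map, rename_configs_alt] at heq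
  exact pv_elem_ne i hdi (List.map_inj_left.mp heq i hi)
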